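-- pv_equiv track=rewrite | github.com/Ahsan-specs/Samsung-Chatbot | src/document_processor.py | _split_specs_into_groups
-- ===== SOURCE A (Python) =====
-- from typing import List, Dict, Tuple, Optional
--
-- def _split_specs_into_groups(specs: dict, title: str, category: str) -> List[str]:
--     """Splits large specification dictionaries into logical groups."""
--     # Group specs by common prefixes/themes
--     display_keys = []
--     camera_keys = []
--     connectivity_keys = []
--     battery_keys = []
--     general_keys = []
--     audio_keys = []
--     cooling_keys = []
--
--     for key in specs:
--         kl = key.lower()
--         if any(w in kl for w in ["display", "screen", "resolution", "color depth", "technology", "size (main", "panel", "refresh", "hdr"]):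
--             display_keys.append(key)
--         elif any(w in kl for w in ["camera", "zoom", "ois", "flash", "video recording", "slow motion"]):
--             camera_keys.append(key)
--         elif any(w in kl for w in ["wifi", "wi-fi", "bluetooth", "usb", "nfc", "sim", "lte", "5g", "gsm", "umts", "infra", "gps", "location", "earjack", "mhl"]):
--             connectivity_keys.append(key)
--         elif any(w in kl for w in ["battery", "charging", "power", "watt"]):
--             battery_keys.append(key)
--         elif any(w in kl for w in ["audio", "sound", "speaker", "dolby", "stereo"]):
--             audio_keys.append(key)
--         elif any(w in kl for w in ["cooling", "compressor", "refrigerant", "btu", "capacity", "noise"]):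
--             cooling_keys.append(key)
--         else:
--             general_keys.append(key)
--
--     groups = []
--     group_map = {
--         "Display": display_keys,
--         "Camera": camera_keys,
--         "Connectivity": connectivity_keys,
--         "Battery & Power": battery_keys,
--         "Audio": audio_keys,
--         "Cooling & Performance": cooling_keys,
--         "General": general_keys
--     }
--
--     for group_name, keys in group_map.items():
--         if keys:
--             lines = [f"{group_name} Specifications for {title} ({category}):"]
--             for k in keys:
--                 lines.append(f"  {k}: {specs[k]}")
--             groups.append("\n".join(lines))
--
--     return groups if groups else [f"Specifications for {title}: " + str(specs)]
-- ===== SOURCE B (Python) =====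
-- def _split_specs_into_groups(specs: dict, title: str, category: str):
--     """Table-driven: scan the keys once per themed category in priority order,
--     tracking already-assigned keys in a set; leftovers go to General."""
--     table = [
--         ("Display", ["display", "screen", "resolution", "color depth", "technology", "size (main", "panel", "refresh", "hdr"]),
--         ("Camera", ["camera", "zoom", "ois", "flash", "video recording", "slow motion"]),
--         ("Connectivity", ["wifi", "wi-fi", "bluetooth", "usb", "nfc", "sim", "lte", "5g", "gsm", "umts", "infra", "gps", "location", "earjack", "mhl"]),
--         ("Battery & Power", ["battery", "charging", "power", "watt"]),
--         ("Audio", ["audio", "sound", "speaker", "dolby", "stereo"]),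
--         ("Cooling & Performance", ["cooling", "compressor", "refrigerant", "btu", "capacity", "noise"]),
--     ]
--     keys = list(specs)
--     assigned = set()
--     pairs = []
--     for name, kws in table:
--         bucket = []
--         for k in keys:
--             kl = k.lower()
--             if any(w in kl for w in kws) and k not in assigned:
--                 bucket.append(k)
--                 assigned.add(k)
--         pairs.append((name, bucket))
--     pairs.append(("General", [k for k in keys if k not in assigned]))
--     groups = [
--         "\n".join([f"{name} Specifications for {title} ({category}):"] + [f"  {k}: {specs[k]}" for k in ks])
--         for name, ks in pairs if ks
--     ]
--     return groups if groups else [f"Specifications for {title}: " + str(specs)]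
-- ===== Notes on version B (the rewrite author's own statement) =====
-- stated objective: alternative
-- what changed: Replaces the key-major elif-chain classification (one pass over keys, seven ad-hoc bucket variables) by a category-major table-driven loop: an ordered (name, keywords) table is scanned category by category over the keys with an 'assigned' set, leftovers form General, and the output is built by a filter+map comprehension instead of nested append loops; Pre_ excludes association lists with duplicate keys, which cannot represent a Python dict.
import Mathlib
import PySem

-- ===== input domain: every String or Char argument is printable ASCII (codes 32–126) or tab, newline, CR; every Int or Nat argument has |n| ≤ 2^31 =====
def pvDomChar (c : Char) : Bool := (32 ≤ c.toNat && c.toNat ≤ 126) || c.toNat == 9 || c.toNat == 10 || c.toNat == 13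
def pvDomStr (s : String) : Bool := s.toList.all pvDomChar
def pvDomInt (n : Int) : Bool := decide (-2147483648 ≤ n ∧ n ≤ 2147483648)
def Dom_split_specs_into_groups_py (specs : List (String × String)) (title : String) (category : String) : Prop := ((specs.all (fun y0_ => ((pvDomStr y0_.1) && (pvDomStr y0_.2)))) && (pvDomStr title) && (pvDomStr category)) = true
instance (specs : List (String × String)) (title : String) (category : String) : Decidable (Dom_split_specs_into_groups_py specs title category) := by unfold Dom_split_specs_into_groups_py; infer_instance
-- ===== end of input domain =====

-- B replaces A's key-major elif-chain bucketing by a category-major table-driven scan with an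
-- assigned-set and a filter+map formatting comprehension (objective: alternative, same cost).


-- shared atoms (both Pythons use the same f-strings / `str(specs)` / `any(w in kl for w in ws)`)
def pvAnyIn (kl : String) (ws : List String) : Bool := ws.any (fun w => PySem.Str.isIn w kl)

def pvFmtLine (specs : List (String × String)) (k : String) : String :=
  -- f"  {k}: {specs[k]}": k always comes from specs, so the lookup cannot fail; getD "" is never the default
  "  " ++ k ++ ": " ++ PySem.Dict.getD (PySem.Dict.mk specs) k ""

def pvHeader (title category name : String) : String :=
  name ++ " Specifications for " ++ title ++ " (" ++ category ++ "):"

-- Python repr of an ASCII string (quote choice and escapes as CPython); only ever reached through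
-- pvStrDict on the empty dict (both programs), where the result is just "{}"
def pvRepr (s : String) : String :=
  let q : Char := if s.toList.contains '\'' && !(s.toList.contains '"') then '"' else '\''
  String.ofList ((q :: (s.toList.flatMap (fun c =>
    if c = '\\' then ['\\', '\\']
    else if c = q then ['\\', q]
    else if c = Char.ofNat 9 then ['\\', 't']
    else if c = Char.ofNat 10 then ['\\', 'n']
    else if c = Char.ofNat 13 then ['\\', 'r']
    else [c]))) ++ [q])

-- str(specs): in both programs this is only reached when groups is empty, i.e. specs = [] (value "{}")
def pvStrDict (specs : List (String × String)) : String :=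
  "{" ++ PySem.Str.join ", " (specs.map (fun p => pvRepr p.1 ++ ": " ++ pvRepr p.2)) ++ "}"

-- ===== PORT A =====
-- the elif chain of A's key loop; accumulator order: display, camera, connectivity, battery, audio, cooling, general
def pvAStep (acc : List String × List String × List String × List String × List String × List String × List String)
    (kv : String × String) :
    List String × List String × List String × List String × List String × List String × List String :=
  let key := kv.1
  let kl := PySem.Str.lower key
  let (d, c, cn, b, a, co, g) := acc
  if pvAnyIn kl ["display", "screen", "resolution", "color depth", "technology", "size (main", "panel", "refresh", "hdr"] then
    (d ++ [key], c, cn, b, a, co, g)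
  else if pvAnyIn kl ["camera", "zoom", "ois", "flash", "video recording", "slow motion"] then
    (d, c ++ [key], cn, b, a, co, g)
  else if pvAnyIn kl ["wifi", "wi-fi", "bluetooth", "usb", "nfc", "sim", "lte", "5g", "gsm", "umts", "infra", "gps", "location", "earjack", "mhl"] then
    (d, c, cn ++ [key], b, a, co, g)
  else if pvAnyIn kl ["battery", "charging", "power", "watt"] then
    (d, c, cn, b ++ [key], a, co, g)
  else if pvAnyIn kl ["audio", "sound", "speaker", "dolby", "stereo"] then
    (d, c, cn, b, a ++ [key], co, g)
  else if pvAnyIn kl ["cooling", "compressor", "refrigerant", "btu", "capacity", "noise"] then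
    (d, c, cn, b, a, co ++ [key], g)
  else
    (d, c, cn, b, a, co, g ++ [key])

def split_specs_into_groups_py (specs : List (String × String)) (title : String) (category : String) : List String :=
  let buckets := specs.foldl pvAStep ([], [], [], [], [], [], [])
  let (d, c, cn, b, a, co, g) := buckets
  let group_map : List (String × List String) :=
    [("Display", d), ("Camera", c), ("Connectivity", cn), ("Battery & Power", b),
     ("Audio", a), ("Cooling & Performance", co), ("General", g)]
  let groups := group_map.foldl (fun groups p =>
    if !p.2.isEmpty then
      groups ++ [PySem.Str.join "\n"
        (p.2.foldl (fun lines k => lines ++ [pvFmtLine specs k]) [pvHeader title category p.1])]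
    else groups) []
  if groups.isEmpty then ["Specifications for " ++ title ++ ": " ++ pvStrDict specs] else groups

-- ===== PORT B =====
def pvTableB : List (String × List String) :=
  [("Display", ["display", "screen", "resolution", "color depth", "technology", "size (main", "panel", "refresh", "hdr"]),
   ("Camera", ["camera", "zoom", "ois", "flash", "video recording", "slow motion"]),
   ("Connectivity", ["wifi", "wi-fi", "bluetooth", "usb", "nfc", "sim", "lte", "5g", "gsm", "umts", "infra", "gps", "location", "earjack", "mhl"]),
   ("Battery & Power", ["battery", "charging", "power", "watt"]),
   ("Audio", ["audio", "sound", "speaker", "dolby", "stereo"]),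
   ("Cooling & Performance", ["cooling", "compressor", "refrigerant", "btu", "capacity", "noise"])]

-- the inner `for k in keys:` loop of one category; state = (bucket, assigned)
def pvBInner (kws : List String) (st : List String × PySem.Set String) (k : String) :
    List String × PySem.Set String :=
  let kl := PySem.Str.lower k
  if pvAnyIn kl kws && !(PySem.Set.contains st.2 k) then (st.1 ++ [k], PySem.Set.add st.2 k) else st

-- the outer `for name, kws in table:` loop; state = (pairs, assigned)
def pvBOuter (keys : List String) (st : List (String × List String) × PySem.Set String)
    (cat : String × List String) : List (String × List String) × PySem.Set String :=
  let r := keys.foldl (pvBInner cat.2) ([], st.2)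
  (st.1 ++ [(cat.1, r.1)], r.2)

def split_specs_into_groups_py_alt (specs : List (String × String)) (title : String) (category : String) : List String :=
  let keys := specs.map Prod.fst
  let st := pvTableB.foldl (pvBOuter keys) ([], PySem.Set.empty)
  let pairs := st.1 ++ [("General", keys.filter (fun k => !(PySem.Set.contains st.2 k)))]
  let groups := (pairs.filter (fun p => !p.2.isEmpty)).map (fun p =>
    PySem.Str.join "\n" (pvHeader title category p.1 :: p.2.map (pvFmtLine specs)))
  if groups.isEmpty then ["Specifications for " ++ title ++ ": " ++ pvStrDict specs] else groups

-- ===== PRECONDITION & SPEC =====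
-- Pre_ excludes association lists with duplicate keys: a Python dict cannot contain them, so no
-- call of A ever sees such an input (B's assigned-set would visit the duplicate only once).
def Pre_split_specs_into_groups_py (specs : List (String × String)) (title : String) (category : String) : Prop :=
  (specs.map Prod.fst).Nodup
instance (specs : List (String × String)) (title : String) (category : String) : Decidable (Pre_split_specs_into_groups_py specs title category) := by unfold Pre_split_specs_into_groups_py; infer_instance

def pvWitness_split_specs_into_groups_py : (List (String × String)) × String × String :=
  ([("Screen Size", "6.1\""), ("Weight", "172 g")], "Galaxy S23", "Smartphone")

def Spec_split_specs_into_groups_py (specs : List (String × String)) (title : String) (category : String) (out : List String) : Prop := out = split_specs_into_groups_py_alt specs title category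
instance (specs : List (String × String)) (title : String) (category : String) (out : List String) : Decidable (Spec_split_specs_into_groups_py specs title category out) := by unfold Spec_split_specs_into_groups_py; infer_instance

-- ===== CLAIM (what is proved, stated in full; the proofs are below) =====
def Claim_equal_split_specs_into_groups_py : Prop := ∀ (specs : List (String × String)) (title : String) (category : String), Dom_split_specs_into_groups_py specs title category → Pre_split_specs_into_groups_py specs title category → Spec_split_specs_into_groups_py specs title category (split_specs_into_groups_py specs title category)

-- ===== LEMMAS AND PROOFS =====
theorem pvWitness_ok :
    Dom_split_specs_into_groups_py (pvWitness_split_specs_into_groups_py.1) (pvWitness_split_specs_into_groups_py.2.1) (pvWitness_split_specs_into_groups_py.2.2) ∧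
    Pre_split_specs_into_groups_py (pvWitness_split_specs_into_groups_py.1) (pvWitness_split_specs_into_groups_py.2.1) (pvWitness_split_specs_into_groups_py.2.2) := by
  decide

-- keyword list of priority class i (0..5; anything else classifies as General = 6)
def pvKws (i : Nat) : List String :=
  match i with
  | 0 => ["display", "screen", "resolution", "color depth", "technology", "size (main", "panel", "refresh", "hdr"]
  | 1 => ["camera", "zoom", "ois", "flash", "video recording", "slow motion"]
  | 2 => ["wifi", "wi-fi", "bluetooth", "usb", "nfc", "sim", "lte", "5g", "gsm", "umts", "infra", "gps", "location", "earjack", "mhl"]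
  | 3 => ["battery", "charging", "power", "watt"]
  | 4 => ["audio", "sound", "speaker", "dolby", "stereo"]
  | 5 => ["cooling", "compressor", "refrigerant", "btu", "capacity", "noise"]
  | _ => []

-- the priority class of a key (first matching category, 6 = General)
def pvCls (k : String) : Nat :=
  if pvAnyIn (PySem.Str.lower k) (pvKws 0) then 0
  else if pvAnyIn (PySem.Str.lower k) (pvKws 1) then 1
  else if pvAnyIn (PySem.Str.lower k) (pvKws 2) then 2
  else if pvAnyIn (PySem.Str.lower k) (pvKws 3) then 3
  else if pvAnyIn (PySem.Str.lower k) (pvKws 4) then 4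
  else if pvAnyIn (PySem.Str.lower k) (pvKws 5) then 5
  else 6

-- the keys of class j, in input order (the bucket of category j)
def pvF (keys : List String) (j : Nat) : List String :=
  keys.filter (fun k => pvCls k == j)

-- the assigned set after the first j categories of B
def pvS (keys : List String) : Nat → PySem.Set String
  | 0 => PySem.Set.empty
  | j + 1 => pvS keys j ++ pvF keys j

theorem pvCls_le (k : String) : pvCls k ≤ 6 := by
  unfold pvCls; split_ifs <;> omega

theorem pvBridge (j : Nat) (hj : j < 6) (x : String) :
    (pvAnyIn (PySem.Str.lower x) (pvKws j) && !(decide (pvCls x < j))) = (pvCls x == j) := by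
  interval_cases j <;> · unfold pvCls; split_ifs <;> simp_all

theorem pvF_cons (k : String) (ks : List String) (j : Nat) :
    pvF (k :: ks) j = if pvCls k == j then k :: pvF ks j else pvF ks j := by
  simp [pvF, List.filter_cons]

theorem pvAStep_foldl (specs : List (String × String))
    (acc : List String × List String × List String × List String × List String × List String × List String) :
    specs.foldl pvAStep acc =
      (acc.1 ++ pvF (specs.map Prod.fst) 0,
       acc.2.1 ++ pvF (specs.map Prod.fst) 1,
       acc.2.2.1 ++ pvF (specs.map Prod.fst) 2,
       acc.2.2.2.1 ++ pvF (specs.map Prod.fst) 3,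
       acc.2.2.2.2.1 ++ pvF (specs.map Prod.fst) 4,
       acc.2.2.2.2.2.1 ++ pvF (specs.map Prod.fst) 5,
       acc.2.2.2.2.2.2 ++ pvF (specs.map Prod.fst) 6) := by
  induction specs generalizing acc with
  | nil => simp [pvF]
  | cons kv rest ih =>
    obtain ⟨d, c, cn, b, a, co, g⟩ := acc
    rw [List.foldl_cons, ih]
    simp only [pvAStep]
    split_ifs with h0 h1 h2 h3 h4 h5
    · have hc : pvCls kv.1 = 0 := by
        unfold pvCls; simp only [pvKws]; rw [if_pos h0]
      simp [pvF_cons, hc]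
    · have hc : pvCls kv.1 = 1 := by
        unfold pvCls; simp only [pvKws]; rw [if_neg h0, if_pos h1]
      simp [pvF_cons, hc]
    · have hc : pvCls kv.1 = 2 := by
        unfold pvCls; simp only [pvKws]; rw [if_neg h0, if_neg h1, if_pos h2]
      simp [pvF_cons, hc]
    · have hc : pvCls kv.1 = 3 := by
        unfold pvCls; simp only [pvKws]; rw [if_neg h0, if_neg h1, if_neg h2, if_pos h3]
      simp [pvF_cons, hc]
    · have hc : pvCls kv.1 = 4 := by
        unfold pvCls; simp only [pvKws]; rw [if_neg h0, if_neg h1, if_neg h2, if_neg h3, if_pos h4]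
      simp [pvF_cons, hc]
    · have hc : pvCls kv.1 = 5 := by
        unfold pvCls; simp only [pvKws]; rw [if_neg h0, if_neg h1, if_neg h2, if_neg h3, if_neg h4, if_pos h5]
      simp [pvF_cons, hc]
    · have hc : pvCls kv.1 = 6 := by
        unfold pvCls; simp only [pvKws]; rw [if_neg h0, if_neg h1, if_neg h2, if_neg h3, if_neg h4, if_neg h5]
      simp [pvF_cons, hc]

theorem pvBInner_foldl (kws : List String) (keys : List String) (b : List String) (s : PySem.Set String)
    (hnd : keys.Nodup) :
    keys.foldl (pvBInner kws) (b, s) =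
      (b ++ keys.filter (fun k => pvAnyIn (PySem.Str.lower k) kws && !(PySem.Set.contains s k)),
       s ++ keys.filter (fun k => pvAnyIn (PySem.Str.lower k) kws && !(PySem.Set.contains s k))) := by
  induction keys generalizing b s with
  | nil => simp
  | cons k rest ih =>
    obtain ⟨hk, hrest⟩ := List.nodup_cons.mp hnd
    simp only [List.foldl_cons, List.filter_cons]
    by_cases hA : pvAnyIn (PySem.Str.lower k) kws = true
    · by_cases hm : k ∈ s
      · have hcs : PySem.Set.contains s k = true := by
          simp [PySem.Set.contains_eq_listContains, List.contains_eq_mem, hm]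
        have hb : (pvAnyIn (PySem.Str.lower k) kws && !(PySem.Set.contains s k)) = false := by
          rw [hA, hcs]; rfl
        have hstep : pvBInner kws (b, s) k = (b, s) := by
          simp only [pvBInner]; rw [hb]; rfl
        rw [hstep, ih _ _ hrest, hb]
        simp
      · have hcs : PySem.Set.contains s k = false := by
          simp [PySem.Set.contains_eq_listContains, List.contains_eq_mem]
          exact hm
        have hb : (pvAnyIn (PySem.Str.lower k) kws && !(PySem.Set.contains s k)) = true := by
          rw [hA, hcs]; rfl
        have hstep : pvBInner kws (b, s) k = (b ++ [k], s ++ [k]) := by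
          simp only [pvBInner]; rw [hb]
          simp only [if_true]
          have hadd : PySem.Set.add s k = s ++ [k] := by
            simp only [PySem.Set.add]; rw [hcs]; rfl
          rw [hadd]
        rw [hstep, ih _ _ hrest]
        have hcongr : rest.filter (fun x => pvAnyIn (PySem.Str.lower x) kws && !(PySem.Set.contains (s ++ [k]) x)) =
            rest.filter (fun x => pvAnyIn (PySem.Str.lower x) kws && !(PySem.Set.contains s x)) := by
          apply List.filter_congr
          intro x hx
          have hxk : x ≠ k := fun h => hk (h ▸ hx)
          simp [PySem.Set.contains_eq_listContains, List.contains_eq_mem, hxk]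
        rw [hcongr, hb]
        simp
    · have hA' : pvAnyIn (PySem.Str.lower k) kws = false := by
        simpa using hA
      have hb : (pvAnyIn (PySem.Str.lower k) kws && !(PySem.Set.contains s k)) = false := by
        rw [hA']; rfl
      have hstep : pvBInner kws (b, s) k = (b, s) := by
        simp only [pvBInner]; rw [hb]; rfl
      rw [hstep, ih _ _ hrest, hb]
      simp

theorem pvS_contains (keys : List String) (j : Nat) (hj : j ≤ 6) :
    ∀ x ∈ keys, PySem.Set.contains (pvS keys j) x = decide (pvCls x < j) := by
  induction j with
  | zero =>
    intro x hx
    simp [pvS, PySem.Set.empty]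
  | succ j ih =>
    intro x hx
    have ihx := ih (by omega) x hx
    have hmem_iff : x ∈ pvS keys j ↔ pvCls x < j := by
      rw [PySem.Set.contains_eq_listContains, List.contains_eq_mem, decide_eq_decide] at ihx
      exact ihx
    simp only [pvS]
    rw [PySem.Set.contains_eq_listContains, List.contains_eq_mem, decide_eq_decide]
    constructor
    · intro hmem
      rcases List.mem_append.mp hmem with h | h
      · have := hmem_iff.mp h; omega
      · have h2 : x ∈ keys ∧ pvCls x = j := by simpa [pvF] using h
        omega
    · intro hlt
      by_cases hlt2 : pvCls x < j
      · exact List.mem_append.mpr (Or.inl (hmem_iff.mpr hlt2))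
      · have hje : pvCls x = j := by omega
        refine List.mem_append.mpr (Or.inr ?_)
        simp only [pvF]
        exact List.mem_filter.mpr ⟨hx, by simp [hje]⟩

theorem pvBStep_eq (keys : List String) (j : Nat) (hj : j < 6) (hnd : keys.Nodup) :
    keys.foldl (pvBInner (pvKws j)) ([], pvS keys j) = (pvF keys j, pvS keys (j + 1)) := by
  rw [pvBInner_foldl _ _ _ _ hnd]
  have hfe : keys.filter (fun k => pvAnyIn (PySem.Str.lower k) (pvKws j) && !(PySem.Set.contains (pvS keys j) k)) =
      pvF keys j := by
    unfold pvF
    apply List.filter_congr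
    intro x hx
    rw [pvS_contains keys j (by omega) x hx, pvBridge j hj x]
  rw [hfe]
  simp [pvS]

theorem pvBMain (keys : List String) (hnd : keys.Nodup) :
    pvTableB.foldl (pvBOuter keys) ([], PySem.Set.empty) =
      ([("Display", pvF keys 0), ("Camera", pvF keys 1), ("Connectivity", pvF keys 2),
        ("Battery & Power", pvF keys 3), ("Audio", pvF keys 4), ("Cooling & Performance", pvF keys 5)],
       pvS keys 6) := by
  have e0 := pvBStep_eq keys 0 (by omega) hnd
  have e1 := pvBStep_eq keys 1 (by omega) hnd
  have e2 := pvBStep_eq keys 2 (by omega) hnd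
  have e3 := pvBStep_eq keys 3 (by omega) hnd
  have e4 := pvBStep_eq keys 4 (by omega) hnd
  have e5 := pvBStep_eq keys 5 (by omega) hnd
  simp only [pvKws, pvS] at e0 e1 e2 e3 e4 e5
  simp only [pvTableB, List.foldl_cons, List.foldl_nil, pvBOuter]
  rw [e0]
  rw [e1]
  rw [e2]
  rw [e3]
  rw [e4]
  rw [e5]
  simp [pvS]

theorem pvGeneral (keys : List String) :
    keys.filter (fun k => !(PySem.Set.contains (pvS keys 6) k)) = pvF keys 6 := by
  unfold pvF
  apply List.filter_congr
  intro x hx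
  rw [pvS_contains keys 6 le_rfl x hx]
  have h6 := pvCls_le x
  by_cases h : pvCls x = 6
  · simp [h]
  · have : pvCls x < 6 := by omega
    simp [this]
    omega

-- ===== VERDICT (by name: the statement is the Claim_ definition above) =====
theorem split_specs_into_groups_py_spec : Claim_equal_split_specs_into_groups_py := by
  intro specs title category _ hpre
  unfold Pre_split_specs_into_groups_py at hpre
  unfold Spec_split_specs_into_groups_py
  simp only [split_specs_into_groups_py, split_specs_into_groups_py_alt]
  rw [pvAStep_foldl]
  dsimp only
  rw [pvBMain _ hpre]
  dsimp only
  rw [pvGeneral]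
  simp only [PySem.List.foldl_append_if, PySem.List.foldl_append_singleton_eq_map,
             List.singleton_append, List.nil_append]
  simp
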